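-- pv_equiv track=rewrite | github.com/nung8388-ctrl/Ak-api-vip | main.py | replace_color_keywords
-- ===== SOURCE A (Python) =====
-- def replace_color_keywords(text):
--     colors = {
--         "[red]": "[FF0000]", "[green]": "[00FF00]", "[blue]": "[0000FF]",
--         "[yellow]": "[FFFF00]", "[pink]": "[FF00FF]", "[cyan]": "[00FFFF]",
--         "[white]": "[FFFFFF]", "[bold]": "[B]", "[br]": "\n", "[italic]": "[I]"
--     }
--     for key, val in colors.items():
--         text = text.replace(key, val)
--         text = text.replace(key.upper(), val)
--     return text
-- ===== SOURCE B (Python) =====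
-- def replace_color_keywords(text):
--     colors = {
--         "[red]": "[FF0000]", "[green]": "[00FF00]", "[blue]": "[0000FF]",
--         "[yellow]": "[FFFF00]", "[pink]": "[FF00FF]", "[cyan]": "[00FFFF]",
--         "[white]": "[FFFFFF]", "[bold]": "[B]", "[br]": "\n", "[italic]": "[I]"
--     }
--     # one table holding every token (lower and upper variant) -> replacement
--     table = {}
--     for k, v in colors.items():
--         table[k] = v
--         table[k.upper()] = v
--     # single left-to-right pass over the text: at each position take the
--     # first token of the table that matches, otherwise copy one character
--     out = []
--     i = 0
--     n = len(text)
--     while i < n: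
--         for k, v in table.items():
--             if text.startswith(k, i):
--                 out.append(v)
--                 i += len(k)
--                 break
--         else:
--             out.append(text[i])
--             i += 1
--     return "".join(out)
-- ===== Notes on version B (the rewrite author's own statement) =====
-- stated objective: alternative
-- what changed: A rebuilds the whole string twenty times (one str.replace per lower/upper token); B builds one token->replacement table and makes a single left-to-right pass over the text, emitting the first matching token's value or copying one character.
import Mathlib
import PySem

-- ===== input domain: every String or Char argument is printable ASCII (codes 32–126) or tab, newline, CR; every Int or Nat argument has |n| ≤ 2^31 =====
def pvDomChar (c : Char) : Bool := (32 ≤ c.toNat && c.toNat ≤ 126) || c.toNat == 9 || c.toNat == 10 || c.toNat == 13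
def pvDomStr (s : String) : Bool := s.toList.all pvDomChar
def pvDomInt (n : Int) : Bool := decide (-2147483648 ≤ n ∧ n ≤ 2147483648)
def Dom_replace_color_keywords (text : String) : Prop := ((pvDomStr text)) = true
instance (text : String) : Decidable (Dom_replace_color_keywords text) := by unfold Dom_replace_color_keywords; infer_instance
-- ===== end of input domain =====

set_option maxRecDepth 8000

-- B replaces A's twenty sequential full-text `str.replace` passes by one left-to-right
-- scan over the text driven by a single token table (objective: alternative traversal).

-- ===== PORT A =====
-- the dict literal, ported as its items association list (insertion order)
def pvColorsA : List (String × String) :=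
  [("[red]", "[FF0000]"), ("[green]", "[00FF00]"), ("[blue]", "[0000FF]"),
   ("[yellow]", "[FFFF00]"), ("[pink]", "[FF00FF]"), ("[cyan]", "[00FFFF]"),
   ("[white]", "[FFFFFF]"), ("[bold]", "[B]"), ("[br]", "\n"), ("[italic]", "[I]")]

-- for key, val in colors.items(): text = text.replace(key, val); text = text.replace(key.upper(), val)
def replace_color_keywords (text : String) : String :=
  pvColorsA.foldl
    (fun t kv =>
      PySem.Str.replace (PySem.Str.replace t kv.1 kv.2) (PySem.Str.upper kv.1) kv.2)
    text

-- ===== PORT B =====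
-- Source B's table-building loop: table[k] = v; table[k.upper()] = v (all keys fresh,
-- so each dict insert appends); kept over List Char since the scan works on characters
-- Source B's own colors dict literal (items association list)
def pvColorsB : List (String × String) :=
  [("[red]", "[FF0000]"), ("[green]", "[00FF00]"), ("[blue]", "[0000FF]"),
   ("[yellow]", "[FFFF00]"), ("[pink]", "[FF00FF]"), ("[cyan]", "[00FFFF]"),
   ("[white]", "[FFFFFF]"), ("[bold]", "[B]"), ("[br]", "\n"), ("[italic]", "[I]")]

def pvTableB : List (List Char × List Char) :=
  pvColorsB.foldl
    (fun acc kv =>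
      acc ++ [(kv.1.toList, kv.2.toList), ((PySem.Str.upper kv.1).toList, kv.2.toList)])
    []

-- Source B's single while-loop pass: at each position the first table token that matches
-- is replaced, otherwise one character is copied.  `max k.length 1` is only a
-- totality guard (every table key is nonempty, so it equals k.length).
def pvScan (tbl : List (List Char × List Char)) : List Char → List Char
  | [] => []
  | c :: t =>
    match tbl.find? (fun p => p.1.isPrefixOf (c :: t)) with
    | some (k, _v) => _v ++ pvScan tbl ((c :: t).drop (max k.length 1))
    | none => c :: pvScan tbl t
termination_by s => s.length
decreasing_by
  all_goals simp

def replace_color_keywords_alt (text : String) : String :=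
  String.ofList (pvScan pvTableB text.toList)

-- ===== PRECONDITION & SPEC =====
def Spec_replace_color_keywords (text : String) (out : String) : Prop := out = replace_color_keywords_alt text
instance (text : String) (out : String) : Decidable (Spec_replace_color_keywords text out) := by unfold Spec_replace_color_keywords; infer_instance

-- ===== CLAIM (what is proved, stated in full; the proofs are below) =====
def Claim_equal_replace_color_keywords : Prop := ∀ (text : String), Dom_replace_color_keywords text → Spec_replace_color_keywords text (replace_color_keywords text)

-- ===== LEMMAS AND PROOFS =====

-- clean recursive form of Python's str.replace (for a nonempty pattern)
def rp (old nw : List Char) : List Char → List Char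
  | [] => []
  | c :: t =>
    if old.isPrefixOf (c :: t) then nw ++ rp old nw (t.drop (old.length - 1))
    else c :: rp old nw t
termination_by s => s.length
decreasing_by
  all_goals simp

theorem rp_nil (old nw : List Char) : rp old nw [] = [] := by simp [rp]

theorem rp_pos (old nw : List Char) (c : Char) (t : List Char) (h : old <+: c :: t) :
    rp old nw (c :: t) = nw ++ rp old nw (t.drop (old.length - 1)) := by
  rw [rp]; simp [List.isPrefixOf_iff_prefix.2 h]

theorem rp_neg (old nw : List Char) (c : Char) (t : List Char) (h : ¬ old <+: c :: t) :
    rp old nw (c :: t) = c :: rp old nw t := by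
  rw [rp, if_neg]
  simpa [List.isPrefixOf_iff_prefix] using h

theorem go_eq (old nw : List Char) (h : old ≠ []) :
    ∀ (fuel : Nat) (l acc : List Char), l.length ≤ fuel →
      PySem.Chars.replace.go old nw fuel l acc = acc.reverse ++ rp old nw l := by
  intro fuel
  induction fuel with
  | zero =>
    intro l acc hl
    have hnil : l = [] := List.eq_nil_of_length_eq_zero (Nat.le_zero.mp hl)
    subst hnil
    rw [PySem.Chars.replace.go.eq_1, rp_nil]
  | succ n ih =>
    intro l acc hl
    cases l with
    | nil =>
      rw [PySem.Chars.replace.go.eq_2 old nw (n + 1) acc (by omega), rp_nil]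
      simp
    | cons c t =>
      rw [PySem.Chars.replace.go.eq_3]
      by_cases hp : old.isPrefixOf (c :: t)
      · rw [if_pos hp]
        obtain ⟨m, hm⟩ : ∃ m, old.length = m + 1 := by
          cases hol : old.length with
          | zero => exact absurd (List.eq_nil_of_length_eq_zero hol) h
          | succ m => exact ⟨m, rfl⟩
        have hdrop : (c :: t).drop old.length = t.drop m := by rw [hm]; simp
        have hlen : ((c :: t).drop old.length).length ≤ n := by
          rw [hdrop]; simp at hl ⊢; omega
        rw [ih _ _ hlen, rp_pos old nw c t (List.isPrefixOf_iff_prefix.1 hp), hdrop, hm]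
        simp
      · rw [if_neg hp]
        have hnp : ¬ old <+: c :: t := fun hb => hp (List.isPrefixOf_iff_prefix.2 hb)
        have hlen : t.length ≤ n := by simp at hl; omega
        rw [ih _ _ hlen, rp_neg old nw c t hnp]
        simp

theorem replace_eq_rp (s old nw : List Char) (h : old ≠ []) :
    PySem.Chars.replace s old nw = rp old nw s := by
  rw [PySem.Chars.replace, if_neg (by simpa [List.isEmpty_iff] using h)]
  simpa using go_eq old nw h s.length s [] le_rfl

-- the twenty-replace composite, as a fold of rp
def compAll (ps : List (List Char × List Char)) (s : List Char) : List Char :=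
  ps.foldl (fun s p => rp p.1 p.2 s) s

theorem compAll_nil (ps : List (List Char × List Char)) : compAll ps [] = [] := by
  induction ps with
  | nil => rfl
  | cons p ps ih => simpa [compAll, rp_nil] using ih

-- "no token occurrence of k' begins strictly inside u (for any continuation)"
def NoHit (k' u : List Char) : Prop :=
  ∀ (t : List Char) (j : Nat), j < u.length → ¬ k' <+: (u ++ t).drop j

theorem rp_append (k' v' u : List Char) (hno : NoHit k' u) (t : List Char) :
    rp k' v' (u ++ t) = u ++ rp k' v' t := by
  induction u with
  | nil => rfl
  | cons c u' ih =>
    have h0 : ¬ k' <+: (c :: u') ++ t := by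
      simpa using hno t 0 (by simp)
    rw [List.cons_append, rp_neg k' v' c (u' ++ t) (by simpa using h0)]
    have hno' : NoHit k' u' := by
      intro t' j hj
      have := hno t' (j + 1) (by simpa using Nat.succ_lt_succ hj)
      simpa using this
    rw [ih hno']
    simp

theorem rp_fire (k v u : List Char) (hk : k ≠ []) :
    rp k v (k ++ u) = v ++ rp k v u := by
  cases k with
  | nil => exact absurd rfl hk
  | cons c k' =>
    rw [List.cons_append, rp_pos (c :: k') v c (k' ++ u) ⟨u, by simp⟩]
    simp

theorem nohit_of (k' u : List Char) (hh : k'.head? = some '[')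
    (hne : ∀ t, ¬ k' <+: u ++ t) (hint : ∀ c ∈ u.drop 1, c ≠ '[') : NoHit k' u := by
  intro t j hj hpre
  cases j with
  | zero => exact hne t (by simpa using hpre)
  | succ j =>
    rw [List.drop_append_of_le_length (by omega)] at hpre
    rw [List.drop_eq_getElem_cons hj] at hpre
    cases k' with
    | nil => simp at hh
    | cons a k'' =>
      have ha : a = '[' := by simpa using hh
      rw [List.cons_append, List.cons_prefix_cons] at hpre
      have hjlen : j < (u.drop 1).length := by simp; omega
      have hmem : (u.drop 1)[j] ∈ u.drop 1 := List.getElem_mem hjlen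
      have hval : (u.drop 1)[j] = u[j + 1] := by
        rw [List.getElem_drop]
        congr 1
        omega
      exact hint _ hmem (by rw [hval, ← hpre.1, ha])

-- decidable facts about the concrete table
theorem tbl_key_ne_nil : ∀ p ∈ pvTableB, p.1 ≠ [] := by decide
theorem tbl_val_ne_nil : ∀ p ∈ pvTableB, p.2 ≠ [] := by decide
theorem tbl_key_head : ∀ p ∈ pvTableB, p.1.head? = some '[' := by decide
theorem tbl_key_int_b :
    pvTableB.all (fun p => (p.1.drop 1).all (fun c => !(c == '[') && !(c == '\n'))) = true := by
  decide
theorem tbl_key_int : ∀ p ∈ pvTableB, ∀ c ∈ p.1.drop 1, c ≠ '[' ∧ c ≠ '\n' := by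
  have h := tbl_key_int_b
  rw [List.all_eq_true] at h
  intro p hp c hc
  have h2 := h p hp
  rw [List.all_eq_true] at h2
  have h3 := h2 c hc
  simp at h3
  exact h3
theorem tbl_val_int_b :
    pvTableB.all (fun p => (p.2.drop 1).all (fun c => !(c == '['))) = true := by decide
theorem tbl_val_int : ∀ p ∈ pvTableB, ∀ c ∈ p.2.drop 1, c ≠ '[' := by
  have h := tbl_val_int_b
  rw [List.all_eq_true] at h
  intro p hp c hc
  have h2 := h p hp
  rw [List.all_eq_true] at h2
  have h3 := h2 c hc
  simpa using h3
theorem tbl_val_head : ∀ p ∈ pvTableB, p.2.head? = some '[' ∨ p.2.head? = some '\n' := by decide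
theorem tbl_keys_pfx : ∀ p ∈ pvTableB, ∀ q ∈ pvTableB, p.1 <+: q.1 → p.1 = q.1 := by decide
theorem tbl_key_val_pfx : ∀ p ∈ pvTableB, ∀ q ∈ pvTableB, ¬ p.1 <+: q.2 ∧ ¬ q.2 <+: p.1 := by decide
theorem tbl_pairwise : pvTableB.Pairwise (fun p q => p.1 ≠ q.1) := by decide

theorem nohit_key : ∀ p ∈ pvTableB, ∀ q ∈ pvTableB, q.1 ≠ p.1 → NoHit q.1 p.1 := by
  intro p hp q hq hne
  apply nohit_of
  · exact tbl_key_head q hq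
  · intro t hcontra
    rcases List.prefix_or_prefix_of_prefix hcontra (List.prefix_append p.1 t) with h1 | h2
    · exact hne (tbl_keys_pfx q hq p hp h1)
    · exact hne ((tbl_keys_pfx p hp q hq h2).symm)
  · intro c hc; exact (tbl_key_int p hp c hc).1

theorem nohit_val : ∀ p ∈ pvTableB, ∀ q ∈ pvTableB, NoHit q.1 p.2 := by
  intro p hp q hq
  apply nohit_of
  · exact tbl_key_head q hq
  · intro t hcontra
    rcases List.prefix_or_prefix_of_prefix hcontra (List.prefix_append p.2 t) with h1 | h2
    · exact (tbl_key_val_pfx q hq p hp).1 h1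
    · exact (tbl_key_val_pfx q hq p hp).2 h2
  · intro c hc; exact tbl_val_int p hp c hc

theorem compAll_append (a b : List (List Char × List Char)) (s : List Char) :
    compAll (a ++ b) s = compAll b (compAll a s) := List.foldl_append

theorem compAll_pass (ps : List (List Char × List Char)) (u : List Char)
    (hno : ∀ p ∈ ps, NoHit p.1 u) :
    ∀ w, compAll ps (u ++ w) = u ++ compAll ps w := by
  induction ps with
  | nil => intro w; rfl
  | cons q ps' ih =>
    intro w
    show compAll ps' (rp q.1 q.2 (u ++ w)) = u ++ compAll ps' (rp q.1 q.2 w)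
    rw [rp_append q.1 q.2 u (hno q (by simp)) w]
    exact ih (fun p hp => hno p (by simp [hp])) _

-- a prefix free of '[' and '\n' survives one rp backwards
theorem clean_prefix_rp (k v : List Char) (hkv : (k, v) ∈ pvTableB) :
    ∀ (n : Nat) (t : List Char), t.length ≤ n → ∀ p', (∀ c ∈ p', c ≠ '[' ∧ c ≠ '\n') →
      p' <+: rp k v t → p' <+: t := by
  intro n
  induction n with
  | zero =>
    intro t ht p' _ hpre
    have : t = [] := List.eq_nil_of_length_eq_zero (Nat.le_zero.mp ht)
    subst this
    rwa [rp_nil] at hpre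
  | succ n ih =>
    intro t ht p' hcl hpre
    cases t with
    | nil => rwa [rp_nil] at hpre
    | cons c t0 =>
      by_cases hp : k <+: c :: t0
      · rw [rp_pos _ _ _ _ hp] at hpre
        cases p' with
        | nil => exact List.nil_prefix
        | cons d p'' =>
          cases hv : v with
          | nil => exact absurd hv (tbl_val_ne_nil (k, v) hkv)
          | cons e v' =>
            rw [hv, List.cons_append, List.cons_prefix_cons] at hpre
            have hd := hcl d (by simp)
            have he : e = '[' ∨ e = '\n' := by
              rcases tbl_val_head (k, v) hkv with h | h <;> [left; right] <;>
                simpa [hv] using h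
            rcases he with he | he
            · exact absurd (hpre.1.trans he) hd.1
            · exact absurd (hpre.1.trans he) hd.2
      · rw [rp_neg _ _ _ _ hp] at hpre
        cases p' with
        | nil => exact List.nil_prefix
        | cons d p'' =>
          rw [List.cons_prefix_cons] at hpre ⊢
          refine ⟨hpre.1, ih t0 (by simp at ht; omega) p''
            (fun c hc => hcl c (by simp [hc])) hpre.2⟩

theorem no_new_match (k v : List Char) (hkv : (k, v) ∈ pvTableB) (c : Char) (t : List Char)
    (H : ∀ p ∈ pvTableB, ¬ p.1 <+: c :: t) :
    ∀ p ∈ pvTableB, ¬ p.1 <+: c :: rp k v t := by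
  intro p hp hpre
  cases hk'' : p.1 with
  | nil => exact tbl_key_ne_nil p hp hk''
  | cons a kr =>
    rw [hk'', List.cons_prefix_cons] at hpre
    have hclean : ∀ x ∈ kr, x ≠ '[' ∧ x ≠ '\n' := by
      intro x hx
      exact tbl_key_int p hp x (by rw [hk'']; simpa using hx)
    have hkt : kr <+: t :=
      clean_prefix_rp k v hkv t.length t le_rfl kr hclean hpre.2
    exact H p hp (by rw [hk'', List.cons_prefix_cons]; exact ⟨hpre.1, hkt⟩)

theorem compAll_none (ps : List (List Char × List Char)) (hps : ∀ p ∈ ps, p ∈ pvTableB)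
    (c : Char) :
    ∀ t, (∀ p ∈ pvTableB, ¬ p.1 <+: c :: t) → compAll ps (c :: t) = c :: compAll ps t := by
  induction ps with
  | nil => intro t _; rfl
  | cons q ps' ih =>
    intro t H
    show compAll ps' (rp q.1 q.2 (c :: t)) = c :: compAll ps' (rp q.1 q.2 t)
    rw [rp_neg _ _ _ _ (H q (hps q (by simp)))]
    exact ih (fun p hp => hps p (by simp [hp])) (rp q.1 q.2 t)
      (no_new_match q.1 q.2 (by simpa using hps q (by simp)) c t H)

theorem comp_eq_scan : ∀ (n : Nat) (s : List Char), s.length ≤ n →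
    compAll pvTableB s = pvScan pvTableB s := by
  intro n
  induction n with
  | zero =>
    intro s hs
    have : s = [] := List.eq_nil_of_length_eq_zero (Nat.le_zero.mp hs)
    subst this
    rw [compAll_nil, pvScan.eq_1]
  | succ n ih =>
    intro s hs
    cases s with
    | nil => rw [compAll_nil, pvScan.eq_1]
    | cons c t =>
      cases hfind : pvTableB.find? (fun p => p.1.isPrefixOf (c :: t)) with
      | none =>
        have H : ∀ p ∈ pvTableB, ¬ p.1 <+: c :: t := by
          intro p hp hpre
          have := List.find?_eq_none.mp hfind p hp
          exact this (List.isPrefixOf_iff_prefix.2 hpre)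
        rw [compAll_none pvTableB (fun p hp => hp) c t H, pvScan.eq_2, hfind]
        exact congrArg (c :: ·) (ih t (by simp at hs; omega))
      | some kv =>
        obtain ⟨k, v⟩ := kv
        have hmem : (k, v) ∈ pvTableB := List.mem_of_find?_eq_some hfind
        have hk : k ≠ [] := tbl_key_ne_nil (k, v) hmem
        have hklen : 1 ≤ k.length := List.length_pos_iff.mpr hk
        have hpt : k.isPrefixOf (c :: t) = true := by
          simpa using List.find?_some hfind
        have hpre : k <+: c :: t := List.isPrefixOf_iff_prefix.1 hpt
        obtain ⟨rest, hu⟩ := hpre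
        obtain ⟨pre, post, htb⟩ := List.append_of_mem hmem
        have hpw := tbl_pairwise
        rw [htb, List.pairwise_append] at hpw
        have hne_pre : ∀ p ∈ pre, p.1 ≠ k := fun p hp =>
          hpw.2.2 p hp (k, v) (by simp)
        have hne_post : ∀ p ∈ post, p.1 ≠ k := fun p hp =>
          (List.pairwise_cons.mp hpw.2.1).1 p hp |>.symm
        have hmem_pre : ∀ p ∈ pre, p ∈ pvTableB := fun p hp => by
          rw [htb]; exact List.mem_append_left _ hp
        have hmem_post : ∀ p ∈ post, p ∈ pvTableB := fun p hp => by
          rw [htb]; exact List.mem_append_right _ (by simp [hp])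
        have hno_pre : ∀ p ∈ pre, NoHit p.1 k := fun p hp =>
          nohit_key (k, v) hmem p (hmem_pre p hp) (hne_pre p hp)
        have hno_post : ∀ p ∈ post, NoHit p.1 v := fun p hp =>
          nohit_val (k, v) hmem p (hmem_post p hp)
        have hcons : ∀ w, compAll ((k, v) :: post) w = compAll post (rp k v w) :=
          fun w => rfl
        have hrest : rest.length ≤ n := by
          have := congrArg List.length hu
          simp at this hs
          omega
        calc compAll pvTableB (c :: t)
            = compAll ((k, v) :: post) (compAll pre (k ++ rest)) := by
              rw [← hu, htb, compAll_append]
          _ = compAll post (rp k v (k ++ compAll pre rest)) := by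
              rw [compAll_pass pre k hno_pre rest, hcons]
          _ = compAll post (v ++ rp k v (compAll pre rest)) := by
              rw [rp_fire k v _ hk]
          _ = v ++ compAll post (rp k v (compAll pre rest)) :=
              compAll_pass post v hno_post _
          _ = v ++ compAll pvTableB rest := by
              rw [htb, compAll_append, hcons]
          _ = v ++ pvScan pvTableB rest := by rw [ih rest hrest]
          _ = pvScan pvTableB (c :: t) := by
              have hmax : max k.length 1 = k.length := by omega
              have hdrop : (c :: t).drop k.length = rest := by
                rw [← hu, List.drop_left]
              rw [pvScan.eq_2, hfind]
              show v ++ pvScan pvTableB rest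
                  = v ++ pvScan pvTableB ((c :: t).drop (max k.length 1))
              rw [hmax, hdrop]

-- A's fold, pushed to character lists
def expandA (l : List (String × String)) : List (List Char × List Char) :=
  l.flatMap (fun kv => [(kv.1.toList, kv.2.toList), ((PySem.Str.upper kv.1).toList, kv.2.toList)])

theorem bridgeA : ∀ (l : List (String × String)) (t : String),
    (∀ kv ∈ l, kv.1.toList ≠ [] ∧ (PySem.Str.upper kv.1).toList ≠ []) →
    (l.foldl (fun t kv =>
        PySem.Str.replace (PySem.Str.replace t kv.1 kv.2) (PySem.Str.upper kv.1) kv.2) t).toList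
      = compAll (expandA l) t.toList := by
  intro l
  induction l with
  | nil => intro t _; rfl
  | cons kv l' ih =>
    intro t hne
    rw [List.foldl_cons, ih _ (fun p hp => hne p (by simp [hp]))]
    have hstep :
        (PySem.Str.replace (PySem.Str.replace t kv.1 kv.2) (PySem.Str.upper kv.1) kv.2).toList
          = rp (PySem.Str.upper kv.1).toList kv.2.toList
              (rp kv.1.toList kv.2.toList t.toList) := by
      rw [PySem.Str.toList_replace, PySem.Str.toList_replace,
        replace_eq_rp _ _ _ (hne kv (by simp)).1,
        replace_eq_rp _ _ _ (hne kv (by simp)).2]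
    rw [hstep]
    rfl

theorem expandA_colors : expandA pvColorsA = pvTableB := by decide

-- ===== VERDICT (by name: the statement is the Claim_ definition above) =====
theorem replace_color_keywords_spec : Claim_equal_replace_color_keywords := by
  intro text _
  unfold Spec_replace_color_keywords
  have hA : (replace_color_keywords text).toList = compAll pvTableB text.toList := by
    unfold replace_color_keywords
    rw [bridgeA pvColorsA text (by decide), expandA_colors]
  have hB : replace_color_keywords_alt text
      = String.ofList (pvScan pvTableB text.toList) := rfl
  rw [hB, ← comp_eq_scan text.toList.length text.toList le_rfl, ← hA,
    String.ofList_toList]
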